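-- pv_equiv track=rewrite | github.com/Redd-devel/dbox_sync | libs/api_acts.py | arrive_cut
-- ===== SOURCE A (Python) =====
-- def arrive_cut(folders, files):
--     separated_files_by_name = []
--     for folder in folders:
--         temp_list = []
--         for file in files:
--             if folder in file:
--                 temp_list.append(file)
--         separated_files_by_name.append(sorted(temp_list, reverse=True))
--     return separated_files_by_name
-- ===== SOURCE B (Python) =====
-- def arrive_cut(folders, files):
--     # Sort the whole file list once in descending order; each group is then a
--     # filter of that ordered list, already descending (filtering preserves order).
--     ordered = sorted(files, reverse=True)
--     return [[f for f in ordered if folder in f] for folder in folders]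
-- ===== Notes on version B (the rewrite author's own statement) =====
-- stated objective: simpler
-- what changed: One global descending sort of files followed by a per-folder filter replaces A's per-folder collect-then-sort; filtering a sorted list keeps it sorted, so no per-group sort is needed.
import Mathlib
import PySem

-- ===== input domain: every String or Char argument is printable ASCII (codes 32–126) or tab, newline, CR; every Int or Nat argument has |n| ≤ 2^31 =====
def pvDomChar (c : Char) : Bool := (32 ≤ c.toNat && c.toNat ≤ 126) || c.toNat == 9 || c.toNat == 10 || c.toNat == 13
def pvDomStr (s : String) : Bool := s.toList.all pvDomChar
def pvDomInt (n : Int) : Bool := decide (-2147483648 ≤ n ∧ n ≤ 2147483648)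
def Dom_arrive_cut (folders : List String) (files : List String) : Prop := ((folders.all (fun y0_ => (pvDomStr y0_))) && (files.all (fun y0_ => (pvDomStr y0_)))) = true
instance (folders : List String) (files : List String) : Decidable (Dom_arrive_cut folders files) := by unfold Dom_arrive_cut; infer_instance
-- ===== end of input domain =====

-- B replaces A's per-folder collect-then-sort with ONE global descending sort of
-- files followed by a per-folder filter (objective: simpler).

-- ===== PORT A =====
-- for folder in folders: collect files containing folder, sort that group descending
def arrive_cut (folders : List String) (files : List String) : List (List String) :=
  folders.foldl
    (fun separated folder =>
      let temp := files.foldl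
        (fun temp file => if PySem.Str.isIn folder file then temp ++ [file] else temp) []
      separated ++ [PySem.List.sorted temp (fun x => x) true])
    []

-- ===== PORT B =====
-- ordered = sorted(files, reverse=True); each group = filter of ordered
def arrive_cut_alt (folders : List String) (files : List String) : List (List String) :=
  let ordered := PySem.List.sorted files (fun x => x) true
  folders.map (fun folder => ordered.filter (fun f => PySem.Str.isIn folder f))

-- ===== PRECONDITION & SPEC =====
def Spec_arrive_cut (folders : List String) (files : List String) (out : List (List String)) : Prop := out = arrive_cut_alt folders files
instance (folders : List String) (files : List String) (out : List (List String)) : Decidable (Spec_arrive_cut folders files out) := by unfold Spec_arrive_cut; infer_instance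

-- ===== CLAIM (what is proved, stated in full; the proofs are below) =====
def Claim_equal_arrive_cut : Prop := ∀ (folders : List String) (files : List String), Dom_arrive_cut folders files → Spec_arrive_cut folders files (arrive_cut folders files)

-- ===== LEMMAS AND PROOFS =====

-- Sorting the filtered list descending equals filtering the descending-sorted list:
-- both are permutations of `files.filter p`, both are pairwise ≥, and ≥ is antisymmetric.
theorem sorted_filter_comm (p : String → Bool) (files : List String) :
    PySem.List.sorted (files.filter p) (fun x => x) true =
      (PySem.List.sorted files (fun x => x) true).filter p := by
  apply List.Perm.eq_of_pairwise (l₁ := _)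
  · exact fun a b _ _ h1 h2 => le_antisymm h2 h1
  · exact PySem.List.sorted_pairwise_rev (files.filter p) (fun x => x)
  · exact (PySem.List.sorted_pairwise_rev files (fun x => x)).sublist
      ((PySem.List.sorted files (fun x => x) true).filter_sublist)
  · exact (PySem.List.sorted_perm (files.filter p) (fun x => x) true).trans
      ((PySem.List.sorted_perm files (fun x => x) true).filter p).symm

theorem arrive_cut_eq_alt (folders files : List String) :
    arrive_cut folders files = arrive_cut_alt folders files := by
  unfold arrive_cut arrive_cut_alt
  rw [PySem.List.foldl_append_singleton_eq_map]
  simp only [List.nil_append]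
  refine List.map_congr_left (fun folder _ => ?_)
  simp only [PySem.List.foldl_append_if, List.map_id_fun', id, List.nil_append]
  exact sorted_filter_comm (fun f => PySem.Str.isIn folder f) files

-- ===== VERDICT (by name: the statement is the Claim_ definition above) =====
theorem arrive_cut_spec : Claim_equal_arrive_cut := by
  intro folders files _
  exact arrive_cut_eq_alt folders files
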